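-- pv_equiv track=rewrite | github.com/valens10/Users-management-api | users/utils.py | is_username_phone_number
-- ===== SOURCE A (Python) =====
-- import string, random
--
-- def is_username_phone_number(username):
--     """
--
--     :param str username: Username to check if it's a phone number
--     :return: bool
--     """
--     if not username:
--         return False
--
--     username = username.replace(" ", "")
--     username = username.replace("(", "")
--     username = username.replace(")", "")
--     username = username.replace("-", "")
--
--     for c in string.ascii_letters:
--         if c in username:
--             return False
--     return username.startswith("+")
-- ===== SOURCE B (Python) =====
-- def is_username_phone_number(username):
--     # single left-to-right pass: skip formatting chars, reject on the first
--     # ASCII letter, remember the first significant character seen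
--     first = None
--     for ch in username:
--         if ch == ' ' or ch == '(' or ch == ')' or ch == '-':
--             continue
--         if 'a' <= ch <= 'z' or 'A' <= ch <= 'Z':
--             return False
--         if first is None:
--             first = ch
--     return first == '+'
-- ===== Notes on version B (the rewrite author's own statement) =====
-- stated objective: alternative
-- what changed: B is a single-pass early-exit state machine: one scan of the username that skips the formatting characters inline, rejects immediately on an ASCII letter via range comparisons, and remembers only the first significant character, replacing A's four replace() passes, 52-iteration alphabet-over-string substring scan and startswith().
import Mathlib
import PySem

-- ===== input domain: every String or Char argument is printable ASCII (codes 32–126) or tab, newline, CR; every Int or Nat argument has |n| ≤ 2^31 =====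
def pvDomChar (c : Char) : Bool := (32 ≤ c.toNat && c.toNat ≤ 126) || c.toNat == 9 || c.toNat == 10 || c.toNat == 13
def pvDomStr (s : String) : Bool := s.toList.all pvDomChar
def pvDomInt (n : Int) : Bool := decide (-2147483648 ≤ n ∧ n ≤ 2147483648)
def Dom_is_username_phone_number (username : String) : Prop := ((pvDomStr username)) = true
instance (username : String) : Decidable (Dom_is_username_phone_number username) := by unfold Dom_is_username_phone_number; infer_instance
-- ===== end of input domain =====

-- B replaces A's four replace() passes plus the 52-iteration alphabet scan by a single
-- left-to-right state-machine pass over the username (objective: alternative).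

-- ===== PORT A =====
-- string.ascii_letters
def pvAsciiLetters : String := "abcdefghijklmnopqrstuvwxyzABCDEFGHIJKLMNOPQRSTUVWXYZ"

-- the 'for c in string.ascii_letters: if c in username: return False' loop, then the final return
def pvLoopA : List Char → String → Bool
  | [], u => PySem.Str.startswith u "+"
  | c :: rest, u => if PySem.Str.isIn (String.ofList [c]) u then false else pvLoopA rest u

def is_username_phone_number (username : String) : Bool :=
  if username == "" then false
  else
    let u1 := PySem.Str.replace username " " ""
    let u2 := PySem.Str.replace u1 "(" ""
    let u3 := PySem.Str.replace u2 ")" ""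
    let u4 := PySem.Str.replace u3 "-" ""
    pvLoopA pvAsciiLetters.toList u4

-- ===== PORT B =====
-- the for-loop of Source B: 'first' is the accumulator, early return on a letter
def pvLoopB : List Char → Option Char → Bool
  | [], first => first == some '+'
  | ch :: rest, first =>
    if ch == ' ' || ch == '(' || ch == ')' || ch == '-' then pvLoopB rest first
    else if ('a' ≤ ch ∧ ch ≤ 'z') ∨ ('A' ≤ ch ∧ ch ≤ 'Z') then false
    else match first with
      | none => pvLoopB rest (some ch)
      | some f => pvLoopB rest (some f)

def is_username_phone_number_alt (username : String) : Bool :=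
  pvLoopB username.toList none

-- ===== PRECONDITION & SPEC =====
def Spec_is_username_phone_number (username : String) (out : Bool) : Prop := out = is_username_phone_number_alt username
instance (username : String) (out : Bool) : Decidable (Spec_is_username_phone_number username out) := by unfold Spec_is_username_phone_number; infer_instance

-- ===== CLAIM (what is proved, stated in full; the proofs are below) =====
def Claim_equal_is_username_phone_number : Prop := ∀ (username : String), Dom_is_username_phone_number username → Spec_is_username_phone_number username (is_username_phone_number username)

-- ===== LEMMAS AND PROOFS =====

-- the characters A strips / the letter test, as predicates used by the proofs
def pvKeep (c : Char) : Bool := !(c == ' ' || c == '(' || c == ')' || c == '-')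
def pvIsLet (c : Char) : Bool := decide (('a' ≤ c ∧ c ≤ 'z') ∨ ('A' ≤ c ∧ c ≤ 'Z'))

-- replace(s, c, "") with a one-character pattern is a filter
theorem pv_go_filter (c : Char) : ∀ (l : List Char) (fuel : Nat) (acc : List Char), l.length ≤ fuel →
    PySem.Chars.replace.go [c] [] fuel l acc = acc.reverse ++ l.filter (fun x => x != c) := by
  intro l
  induction l with
  | nil => intro fuel acc h; cases fuel <;> simp [PySem.Chars.replace.go]
  | cons x t ih =>
    intro fuel acc h
    cases fuel with
    | zero => simp at h
    | succ n =>
      simp only [List.length_cons] at h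
      by_cases hx : x = c
      · subst hx
        simp only [PySem.Chars.replace.go]
        rw [if_pos (by simp [List.isPrefixOf])]
        simp only [List.length_singleton, List.drop_succ_cons, List.drop_zero, List.reverse_nil,
          List.nil_append]
        rw [ih n acc (by omega)]
        simp
      · simp only [PySem.Chars.replace.go]
        rw [if_neg (by simp [List.isPrefixOf, Ne.symm hx])]
        rw [ih n (x :: acc) (by omega)]
        simp [hx]

theorem pv_replace_single (s : List Char) (c : Char) :
    PySem.Chars.replace s [c] [] = s.filter (fun x => x != c) := by
  rw [PySem.Chars.replace]
  simp only [List.isEmpty_cons]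
  rw [pv_go_filter c s s.length [] le_rfl]
  simp

-- 'c in s' for a one-character needle is membership
theorem pv_isIn_singleton (c : Char) (l : List Char) :
    PySem.Chars.isIn [c] l = l.contains c := by
  rcases h : l.contains c with _ | _
  · rw [PySem.Chars.isIn_eq_false_iff]
    intro hin
    have := hin.subset (List.mem_singleton_self c)
    simp [List.contains_eq_mem] at h
    exact h this
  · rw [PySem.Chars.isIn_iff_infix]
    simp only [List.contains_eq_mem, decide_eq_true_eq] at h
    obtain ⟨s, t, rfl⟩ := List.append_of_mem h
    exact ⟨s, t, by simp⟩

-- scanning the alphabet for a char of u = scanning u for a char of the alphabet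
theorem pv_any_mem_comm (xs ys : List Char) :
    xs.any (fun c => ys.contains c) = ys.any (fun c => xs.contains c) := by
  rcases h : ys.any (fun c => xs.contains c) with _ | _
  · simp only [List.any_eq_false, List.contains_eq_mem] at h ⊢
    intro a ha; simp only [decide_eq_true_eq] at *
    intro hb; exact absurd ha (by simpa using h a hb)
  · simp only [List.any_eq_true, List.contains_eq_mem, decide_eq_true_eq] at h ⊢
    obtain ⟨a, ha, hb⟩ := h; exact ⟨a, hb, ha⟩

theorem pv_startswith_plus (l : List Char) :
    PySem.Chars.startswith l ['+'] = (match l with | [] => false | c :: _ => c == '+') := by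
  cases l with
  | nil => simp [PySem.Chars.startswith, List.isPrefixOf]
  | cons c t => simp [PySem.Chars.startswith, List.isPrefixOf, eq_comm]

-- A's early-return loop, characterised
theorem pv_loopA_eq (u : String) : ∀ letters : List Char, pvLoopA letters u =
    (if letters.any (fun c => u.toList.contains c) then false else PySem.Str.startswith u "+") := by
  intro letters
  induction letters with
  | nil => simp [pvLoopA]
  | cons c rest ih =>
    simp only [pvLoopA, List.any_cons]
    by_cases hc : c ∈ u.toList
    · simp [pv_isIn_singleton, List.contains_eq_mem, hc]
    · rw [ih]
      simp [pv_isIn_singleton, List.contains_eq_mem, hc]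

-- membership in the 52-letter alphabet = the two ASCII range tests
theorem pv_letter_iff (c : Char) :
    pvAsciiLetters.toList.contains c = pvIsLet c := by
  have hinj : Function.Injective Char.toNat := fun a b h => Char.ext (by
    have : a.val.toNat = b.val.toNat := h
    exact UInt32.toNat_inj.mp this)
  have hle : ∀ a b : Char, (a ≤ b) ↔ (a.toNat ≤ b.toNat) := by
    intro a b
    rw [Char.le_def, UInt32.le_iff_toNat_le]
    rfl
  have c97 : ('a' : Char).toNat = 97 := rfl
  have c122 : ('z' : Char).toNat = 122 := rfl
  have c65 : ('A' : Char).toNat = 65 := rfl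
  have c90 : ('Z' : Char).toNat = 90 := rfl
  rcases h : pvIsLet c with _ | _
  · simp only [pvIsLet, decide_eq_false_iff_not, hle, c97, c122, c65, c90] at h
    simp only [List.contains_eq_mem, decide_eq_false_iff_not]
    intro hmem
    have : c.toNat ∈ pvAsciiLetters.toList.map Char.toNat := List.mem_map_of_mem hmem
    revert this h
    have : pvAsciiLetters.toList.map Char.toNat =
        [97,98,99,100,101,102,103,104,105,106,107,108,109,110,111,112,113,114,115,116,117,118,
         119,120,121,122,65,66,67,68,69,70,71,72,73,74,75,76,77,78,79,80,81,82,83,84,85,86,87,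
         88,89,90] := by decide
    rw [this]
    intro h hmem
    simp only [List.mem_cons, List.not_mem_nil, or_false] at hmem
    omega
  · simp only [pvIsLet, decide_eq_true_eq, hle, c97, c122, c65, c90] at h
    simp only [List.contains_eq_mem, decide_eq_true_eq]
    have hn : c.toNat ∈ pvAsciiLetters.toList.map Char.toNat := by
      have : pvAsciiLetters.toList.map Char.toNat =
          [97,98,99,100,101,102,103,104,105,106,107,108,109,110,111,112,113,114,115,116,117,118,
           119,120,121,122,65,66,67,68,69,70,71,72,73,74,75,76,77,78,79,80,81,82,83,84,85,86,87,
           88,89,90] := by decide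
      rw [this]
      simp only [List.mem_cons, List.not_mem_nil, or_false]
      omega
    obtain ⟨d, hd, hdc⟩ := List.mem_map.mp hn
    exact (hinj hdc) ▸ hd

-- B's loop, characterised in terms of the filtered character list
theorem pv_loopB_eq : ∀ (l : List Char) (first : Option Char),
    pvLoopB l first =
      (if (l.filter pvKeep).any pvIsLet then false
       else match first with
         | some f => f == '+'
         | none => (match l.filter pvKeep with | [] => false | c :: _ => c == '+')) := by
  intro l
  induction l with
  | nil => intro first; cases first <;> simp [pvLoopB]
  | cons c t ih =>
    intro first
    by_cases hs : (c == ' ' || c == '(' || c == ')' || c == '-') = true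
    · have hk : pvKeep c = false := by simp [pvKeep, hs]
      simp only [pvLoopB, hs, if_true, List.filter_cons, hk]
      exact ih first
    · have hk : pvKeep c = true := by simp [pvKeep]; simpa using hs
      simp only [pvLoopB, hs, Bool.false_eq_true, if_false, List.filter_cons, hk, if_true]
      by_cases hl : (('a' ≤ c ∧ c ≤ 'z') ∨ ('A' ≤ c ∧ c ≤ 'Z'))
      · have : pvIsLet c = true := by simpa [pvIsLet] using hl
        simp [hl, this]
      · have hlf : pvIsLet c = false := by simpa [pvIsLet] using hl
        cases first with
        | none => rw [if_neg hl, ih]; simp [hlf]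
        | some f => rw [if_neg hl]; simp only [List.any_cons, hlf, Bool.false_or]; exact ih (some f)

-- the four replaces, composed, are one filter by pvKeep
theorem pv_filters_eq (l : List Char) :
    ((((l.filter (fun x => x != ' ')).filter (fun x => x != '(')).filter
        (fun x => x != ')')).filter (fun x => x != '-'))
      = l.filter pvKeep := by
  simp only [List.filter_filter]
  apply List.filter_congr
  intro a _
  by_cases h1 : a = ' ' <;> by_cases h2 : a = '(' <;> by_cases h3 : a = ')' <;>
    by_cases h4 : a = '-' <;>
    · have e1 : (a == ' ') = (if a = ' ' then true else false) := by split <;> simp_all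
      have e2 : (a == '(') = (if a = '(' then true else false) := by split <;> simp_all
      have e3 : (a == ')') = (if a = ')' then true else false) := by split <;> simp_all
      have e4 : (a == '-') = (if a = '-' then true else false) := by split <;> simp_all
      simp [pvKeep, e1, e2, e3, e4, h1, h2, h3, h4]

-- ===== VERDICT (by name: the statement is the Claim_ definition above) =====
theorem is_username_phone_number_spec : Claim_equal_is_username_phone_number := by
  intro username _
  unfold Spec_is_username_phone_number is_username_phone_number is_username_phone_number_alt
  by_cases hemp : username = ""
  · subst hemp; simp [pvLoopB]
  · have hb : (username == "") = false := by simpa using hemp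
    rw [hb]
    simp only [Bool.false_eq_true, if_false]
    rw [pv_loopA_eq, pv_loopB_eq]
    have hclean :
        (PySem.Str.replace (PySem.Str.replace (PySem.Str.replace (PySem.Str.replace username " " "") "(" "") ")" "") "-" "").toList
          = username.toList.filter pvKeep := by
      simp only [PySem.Str.toList_replace]
      have h1 : (" " : String).toList = [' '] := rfl
      have h2 : ("(" : String).toList = ['('] := rfl
      have h3 : (")" : String).toList = [')'] := rfl
      have h4 : ("-" : String).toList = ['-'] := rfl
      have h0 : ("" : String).toList = [] := rfl
      rw [h1, h2, h3, h4, h0, pv_replace_single, pv_replace_single, pv_replace_single,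
        pv_replace_single]
      exact pv_filters_eq username.toList
    rw [pv_any_mem_comm, hclean]
    simp only [pv_letter_iff]
    split_ifs with h
    · rfl
    · rw [PySem.Str.startswith_eq]
      have hp : ("+" : String).toList = ['+'] := rfl
      rw [hp, hclean, pv_startswith_plus]
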